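-- pv_equiv track=rewrite | github.com/chiemiko/practice-thy-algorithms | python/recursion/candy_crush_attempt2.py | crush_only
-- ===== SOURCE A (Python) =====
-- def crush_only(board, tracker):
--     """ tracker = 1 indicates to crush this item
--                 = 0 do not crush
--     """
--     for col in range(len(board[0])):
--         bottom_idx = len(board) - 1
--
--         for row in range(len(board)-1, -1, -1):
--             if tracker[row][col] == 0:
--                 board[bottom_idx][col] = board[row][col]
--                 bottom_idx -= 1
--
--         for row_ in range(bottom_idx, -1, -1):
--             board[row_][col] = 0
--
--
--     return board
-- ===== SOURCE B (Python) =====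
-- def crush_only(board, tracker):
--     n = len(board)
--     for col in range(len(board[0])):
--         kept = [board[r][col] for r in range(n) if tracker[r][col] == 0]
--         newcol = [0] * (n - len(kept)) + kept
--         for r in range(n):
--             board[r][col] = newcol[r]
--     return board
-- ===== Notes on version B (the rewrite author's own statement) =====
-- stated objective: simpler
-- what changed: Per column, B collects the non-crushed values top-to-bottom with one comprehension and assigns the whole new column ([0]*(n-len(kept)) + kept) back, replacing A's backward scan with a moving bottom_idx write pointer plus a separate zero-fill loop.
import Mathlib
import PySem

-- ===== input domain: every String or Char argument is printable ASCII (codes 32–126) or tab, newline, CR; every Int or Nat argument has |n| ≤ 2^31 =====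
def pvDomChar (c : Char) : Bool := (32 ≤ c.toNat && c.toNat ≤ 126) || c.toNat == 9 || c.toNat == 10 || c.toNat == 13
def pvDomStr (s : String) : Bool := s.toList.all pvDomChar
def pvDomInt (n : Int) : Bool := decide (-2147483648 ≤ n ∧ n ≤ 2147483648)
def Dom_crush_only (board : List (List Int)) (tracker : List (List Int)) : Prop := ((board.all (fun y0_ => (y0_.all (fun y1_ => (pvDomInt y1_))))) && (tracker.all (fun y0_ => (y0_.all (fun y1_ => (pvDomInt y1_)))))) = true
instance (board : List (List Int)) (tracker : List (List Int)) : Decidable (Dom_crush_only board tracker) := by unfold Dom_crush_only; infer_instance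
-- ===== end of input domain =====

-- B replaces A's bottom_idx write-pointer compaction (backward scan + zero-fill loop) by building each
-- new column as a value (zeros ++ kept values, collected top-to-bottom) and writing it back; goal: simpler.
-- Both Pythons mutate `board` in place identically and return it; the equivalence is about the returned board.

-- shared cell primitives (the Python expressions board[i][col] (read) and board[i][col] = v (write))
def pvVal (b : List (List Int)) (i : Int) (col : Int) : Int :=
  PySem.List.pyGetD (PySem.List.pyGetD b i []) col 0
def pvSetCell (b : List (List Int)) (i : Int) (col : Int) (v : Int) : List (List Int) :=
  PySem.List.pySetD b i (PySem.List.pySetD (PySem.List.pyGetD b i []) col v)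

-- ===== PORT A =====
-- board[0] is ported as pyGetD board 0 [] (Python raises on empty board; Pre_ excludes it)
def crush_only (board : List (List Int)) (tracker : List (List Int)) : List (List Int) :=
  (PySem.List.pyRange 0 ((PySem.List.pyGetD board 0 []).length : Int) 1).foldl
    (fun bd col =>
      let step := (PySem.List.pyRange ((bd.length : Int) - 1) (-1) (-1)).foldl
        (fun (st : List (List Int) × Int) row =>
          if PySem.List.pyGetD (PySem.List.pyGetD tracker row []) col 0 == 0 then
            (pvSetCell st.1 st.2 col (pvVal st.1 row col), st.2 - 1)
          else st)
        (bd, (bd.length : Int) - 1)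
      (PySem.List.pyRange step.2 (-1) (-1)).foldl
        (fun b2 row_ => pvSetCell b2 row_ col 0) step.1)
    board

-- ===== PORT B =====
def crush_only_alt (board : List (List Int)) (tracker : List (List Int)) : List (List Int) :=
  let n := board.length
  (PySem.List.pyRange 0 ((PySem.List.pyGetD board 0 []).length : Int) 1).foldl
    (fun bd col =>
      let kept := (PySem.List.pyRange 0 (n : Int) 1).filterMap
        (fun r => if PySem.List.pyGetD (PySem.List.pyGetD tracker r []) col 0 == 0
                  then some (pvVal bd r col) else none)
      let newcol := List.replicate (n - kept.length) 0 ++ kept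
      (PySem.List.pyRange 0 (n : Int) 1).foldl
        (fun b2 r => pvSetCell b2 r col (PySem.List.pyGetD newcol r 0)) bd)
    board

-- ===== PRECONDITION & SPEC =====
-- Pre_ is exactly where Python A returns (no IndexError): board nonempty, and (unless it has zero
-- columns) tracker covers all board rows and every board row / used tracker row reaches every column.
def Pre_crush_only (board : List (List Int)) (tracker : List (List Int)) : Prop :=
  board ≠ [] ∧
  ((board.headD []).length = 0 ∨
    (board.length ≤ tracker.length ∧
     (∀ r ∈ board, (board.headD []).length ≤ r.length) ∧
     (∀ r ∈ tracker.take board.length, (board.headD []).length ≤ r.length)))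
instance (board : List (List Int)) (tracker : List (List Int)) : Decidable (Pre_crush_only board tracker) := by
  unfold Pre_crush_only; infer_instance

def pvWitness_crush_only : List (List Int) × List (List Int) :=
  ([[1, 2], [3, 4]], [[0, 1], [1, 0]])

def Spec_crush_only (board : List (List Int)) (tracker : List (List Int)) (out : List (List Int)) : Prop := out = crush_only_alt board tracker
instance (board : List (List Int)) (tracker : List (List Int)) (out : List (List Int)) : Decidable (Spec_crush_only board tracker out) := by unfold Spec_crush_only; infer_instance

-- ===== CLAIM (what is proved, stated in full; the proofs are below) =====
def Claim_equal_crush_only : Prop := ∀ (board : List (List Int)) (tracker : List (List Int)), Dom_crush_only board tracker → Pre_crush_only board tracker → Spec_crush_only board tracker (crush_only board tracker)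

-- ===== LEMMAS AND PROOFS =====

theorem pv_witness_ok : Dom_crush_only pvWitness_crush_only.1 pvWitness_crush_only.2 ∧
    Pre_crush_only pvWitness_crush_only.1 pvWitness_crush_only.2 := by decide

-- proof-side helpers ----------------------------------------------------------

-- kept values of rows m-1 .. 0, in A's bottom-up discovery order
def pvKeptRev (tracker : List (List Int)) (col : Int) (bd : List (List Int)) : Nat → List Int
  | 0 => []
  | m + 1 =>
      (if PySem.List.pyGetD (PySem.List.pyGetD tracker (m : Int) []) col 0 == 0
       then [pvVal bd (m : Int) col] else []) ++ pvKeptRev tracker col bd m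

-- write the values vs at rows bi, bi-1, …
def pvWriteUp (col : Int) : List (List Int) → Int → List Int → List (List Int)
  | bd, _, [] => bd
  | bd, bi, v :: vs => pvWriteUp col (pvSetCell bd bi col v) (bi - 1) vs

-- zero column col in rows m-1 .. 0
def pvZeroFill (col : Int) : List (List Int) → Nat → List (List Int)
  | bd, 0 => bd
  | bd, m + 1 => pvZeroFill col (pvSetCell bd (m : Int) col 0) m

theorem pv_length_setCell (bd : List (List Int)) (j col v : Int) :
    (pvSetCell bd j col v).length = bd.length := by
  simp [pvSetCell, PySem.List.length_pySetD]

theorem pv_getD_setCell (bd : List (List Int)) (j : Int) (col v : Int) (i : Nat)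
    (hj : 0 ≤ j) :
    (pvSetCell bd j col v).getD i [] =
      if (i : Int) = j ∧ i < bd.length then PySem.List.pySetD (bd.getD i []) col v
      else bd.getD i [] := by
  rw [pvSetCell, PySem.List.pySetD_of_nonneg _ _ hj]
  by_cases h : (i : Int) = j ∧ i < bd.length
  · obtain ⟨h1, h2⟩ := h
    have hji : j.toNat = i := by omega
    rw [if_pos ⟨h1, h2⟩, List.getD_eq_getElem?_getD, hji, List.getElem?_set_self h2,
        Option.getD_some]
    have hrow : PySem.List.pyGetD bd j [] = bd.getD i [] := by
      rw [PySem.List.pyGetD_eq_getElem _ _ hj (by omega), List.getD_eq_getElem _ _ h2]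
      congr 1
    rw [hrow]
  · rw [if_neg h]
    by_cases hi : i < bd.length
    · have hij : ¬ ((i : Int) = j) := fun hc => h ⟨hc, hi⟩
      have hne : j.toNat ≠ i := by omega
      rw [List.getD_eq_getElem?_getD, List.getElem?_set_ne hne, ← List.getD_eq_getElem?_getD]
    · rw [List.getD_eq_getElem?_getD, List.getD_eq_getElem?_getD,
          List.getElem?_eq_none (by rw [List.length_set]; omega), List.getElem?_eq_none (by omega)]

theorem pv_val_setCell (bd : List (List Int)) (j col v : Int) (r : Nat)
    (hr : (r : Int) < j) :
    pvVal (pvSetCell bd j col v) (r : Int) col = pvVal bd (r : Int) col := by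
  have h := pv_getD_setCell bd j col v r (by omega)
  rw [if_neg (by omega)] at h
  unfold pvVal
  rw [PySem.List.pyGetD_natCast, PySem.List.pyGetD_natCast, h]

theorem pv_keptRev_setCell (tracker : List (List Int)) (col : Int)
    (bd : List (List Int)) (j v : Int) :
    ∀ m : Nat, (m : Int) ≤ j →
      pvKeptRev tracker col (pvSetCell bd j col v) m = pvKeptRev tracker col bd m := by
  intro m
  induction m with
  | zero => intro _; rfl
  | succ m ih =>
      intro hm
      simp only [pvKeptRev]
      rw [ih (by push_cast at hm ⊢; omega), pv_val_setCell bd j col v m (by push_cast at hm; omega)]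

theorem pv_keptRev_length_le (tracker : List (List Int)) (col : Int) (bd : List (List Int)) :
    ∀ m : Nat, (pvKeptRev tracker col bd m).length ≤ m := by
  intro m
  induction m with
  | zero => simp [pvKeptRev]
  | succ m ih =>
      simp only [pvKeptRev]
      by_cases h : PySem.List.pyGetD (PySem.List.pyGetD tracker (m : Int) []) col 0 == 0
      · rw [if_pos h]; simp only [List.singleton_append, List.length_cons]; omega
      · rw [if_neg h]; simp only [List.nil_append]; omega

theorem pv_length_writeUp (col : Int) :
    ∀ (vs : List Int) (bd : List (List Int)) (bi : Int),
      (pvWriteUp col bd bi vs).length = bd.length := by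
  intro vs
  induction vs with
  | nil => intro bd bi; rfl
  | cons v vs ih => intro bd bi; rw [pvWriteUp, ih, pv_length_setCell]

theorem pv_length_zeroFill (col : Int) :
    ∀ (m : Nat) (bd : List (List Int)), (pvZeroFill col bd m).length = bd.length := by
  intro m
  induction m with
  | zero => intro bd; rfl
  | succ m ih => intro bd; rw [pvZeroFill, ih, pv_length_setCell]

theorem pv_getD_writeUp (col : Int) :
    ∀ (vs : List Int) (bd : List (List Int)) (bi : Int) (i : Nat),
      (vs.length : Int) ≤ bi + 1 → bi < bd.length →
      (pvWriteUp col bd bi vs).getD i [] =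
        if bi - vs.length < (i : Int) ∧ (i : Int) ≤ bi then
          PySem.List.pySetD (bd.getD i []) col (vs.getD (bi - i).toNat 0)
        else bd.getD i [] := by
  intro vs
  induction vs with
  | nil =>
      intro bd bi i _ _
      rw [pvWriteUp, if_neg (by simp only [List.length_nil, Nat.cast_zero]; omega)]
  | cons v vs ih =>
      intro bd bi i hlen hbi
      have hbi0 : 0 ≤ bi := by simp at hlen; omega
      rw [pvWriteUp, ih _ _ i (by simp at hlen ⊢; omega)
            (by rw [pv_length_setCell]; omega)]
      by_cases hwin : bi - 1 - (vs.length : Int) < (i : Int) ∧ (i : Int) ≤ bi - 1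
      · rw [if_pos hwin, if_pos (by simp; omega)]
        have h := pv_getD_setCell bd bi col v i hbi0
        rw [if_neg (by omega)] at h
        rw [h]
        congr 1
        have : (bi - (i : Int)).toNat = (bi - 1 - (i : Int)).toNat + 1 := by omega
        rw [this, List.getD_cons_succ]
      · rw [if_neg hwin]
        by_cases hieq : (i : Int) = bi
        · have hilt : i < bd.length := by omega
          have h := pv_getD_setCell bd bi col v i hbi0
          rw [if_pos ⟨hieq, hilt⟩] at h
          rw [h, if_pos (by simp; omega)]
          have : (bi - (i : Int)).toNat = 0 := by omega
          rw [this, List.getD_cons_zero]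
        · have h := pv_getD_setCell bd bi col v i hbi0
          rw [if_neg (by intro hc; exact hieq hc.1)] at h
          rw [h, if_neg (by simp; omega)]

theorem pv_getD_zeroFill (col : Int) :
    ∀ (m : Nat) (bd : List (List Int)) (i : Nat),
      (pvZeroFill col bd m).getD i [] =
        if i < m ∧ i < bd.length then PySem.List.pySetD (bd.getD i []) col 0
        else bd.getD i [] := by
  intro m
  induction m with
  | zero => intro bd i; rw [pvZeroFill, if_neg (by omega)]
  | succ m ih =>
      intro bd i
      rw [pvZeroFill, ih]
      have h := pv_getD_setCell bd (m : Int) col 0 i (by omega)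
      by_cases him : i = m
      · subst him
        rw [if_neg (by omega)]
        by_cases hlen : i < bd.length
        · rw [if_pos ⟨rfl, hlen⟩] at h
          rw [h, if_pos ⟨by omega, hlen⟩]
        · rw [if_neg (by simp; omega)] at h
          rw [h, if_neg (by omega)]
      · rw [if_neg (fun hc => him (by exact_mod_cast hc.1))] at h
        rw [pv_length_setCell]
        by_cases hi : i < m ∧ i < bd.length
        · rw [if_pos hi, if_pos ⟨by omega, hi.2⟩, h]
        · rw [if_neg hi, if_neg (by omega), h]

-- A's compaction fold (rows m-1 .. 0) is pvWriteUp of the kept values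
theorem pv_phase1 (tracker : List (List Int)) (col : Int) :
    ∀ (m : Nat) (bd : List (List Int)) (bi : Int), (m : Int) - 1 ≤ bi →
      ((PySem.List.pyRange ((m : Int) - 1) (-1) (-1)).foldl
        (fun (st : List (List Int) × Int) row =>
          if PySem.List.pyGetD (PySem.List.pyGetD tracker row []) col 0 == 0 then
            (pvSetCell st.1 st.2 col (pvVal st.1 row col), st.2 - 1)
          else st) (bd, bi)) =
      (pvWriteUp col bd bi (pvKeptRev tracker col bd m),
       bi - (pvKeptRev tracker col bd m).length) := by
  intro m
  induction m with
  | zero =>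
      intro bd bi _
      rw [show ((0 : Nat) : Int) - 1 = -1 by rfl,
          PySem.List.pyRange_neg_one_eq_nil (by omega)]
      simp [pvKeptRev, pvWriteUp]
  | succ m ih =>
      intro bd bi hbi
      have hm : ((m + 1 : Nat) : Int) - 1 = (m : Int) := by push_cast; ring
      rw [hm, PySem.List.pyRange_neg_one_cons (by omega), List.foldl_cons]
      simp only [pvKeptRev]
      by_cases hkeep : PySem.List.pyGetD (PySem.List.pyGetD tracker (m : Int) []) col 0 == 0
      · rw [if_pos hkeep]
        have hbim : (m : Int) ≤ bi := by omega
        rw [ih (pvSetCell bd bi col (pvVal bd (m : Int) col)) (bi - 1) (by omega),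
            pv_keptRev_setCell tracker col bd bi _ m hbim]
        rw [if_pos hkeep]
        simp only [List.singleton_append, List.length_cons, Prod.mk.injEq, pvWriteUp]
        exact ⟨trivial, by push_cast; ring⟩
      · rw [if_neg hkeep, ih bd bi (by omega), if_neg hkeep]
        simp

-- A's zero-fill fold is pvZeroFill
theorem pv_phase2 (col : Int) :
    ∀ (m : Nat) (bd : List (List Int)),
      ((PySem.List.pyRange ((m : Int) - 1) (-1) (-1)).foldl
        (fun b2 row_ => pvSetCell b2 row_ col 0) bd) = pvZeroFill col bd m := by
  intro m
  induction m with
  | zero =>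
      intro bd
      rw [show ((0 : Nat) : Int) - 1 = -1 by rfl,
          PySem.List.pyRange_neg_one_eq_nil (by omega)]
      rfl
  | succ m ih =>
      intro bd
      have hm : ((m + 1 : Nat) : Int) - 1 = (m : Int) := by push_cast; ring
      rw [hm, PySem.List.pyRange_neg_one_cons (by omega), List.foldl_cons, ih]
      rfl

-- B's comprehension is the reverse of pvKeptRev
theorem pv_filter_kept (tracker : List (List Int)) (col : Int) (bd : List (List Int)) :
    ∀ m : Nat,
      ((PySem.List.pyRange 0 (m : Int) 1).filterMap
        (fun r => if PySem.List.pyGetD (PySem.List.pyGetD tracker r []) col 0 == 0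
                  then some (pvVal bd r col) else none)) =
      (pvKeptRev tracker col bd m).reverse := by
  intro m
  induction m with
  | zero => simp [pvKeptRev, PySem.List.pyRange_one_eq_nil]
  | succ m ih =>
      have hm : ((m + 1 : Nat) : Int) = (m : Int) + 1 := by push_cast; ring
      rw [hm, PySem.List.pyRange_one_succ_right (by omega), List.filterMap_append, ih]
      simp only [pvKeptRev, List.reverse_append]
      congr 1
      by_cases hkeep : PySem.List.pyGetD (PySem.List.pyGetD tracker (m : Int) []) col 0 == 0
      · rw [if_pos hkeep]
        simp only [beq_iff_eq, PySem.List.pyGetD_natCast, List.getD_eq_getElem?_getD] at hkeep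
        simp [hkeep]
      · rw [if_neg hkeep]
        simp only [beq_iff_eq, PySem.List.pyGetD_natCast, List.getD_eq_getElem?_getD] at hkeep
        simp [hkeep]

-- B's write-back fold, characterised cellwise (vals abstract)
theorem pv_length_writeB (col : Int) (vals : List Int) :
    ∀ (m : Nat) (bd : List (List Int)),
      ((PySem.List.pyRange 0 (m : Int) 1).foldl
        (fun b2 r => pvSetCell b2 r col (PySem.List.pyGetD vals r 0)) bd).length = bd.length := by
  intro m
  induction m with
  | zero => intro bd; simp [PySem.List.pyRange_one_eq_nil]
  | succ m ih =>
      intro bd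
      have hm : ((m + 1 : Nat) : Int) = (m : Int) + 1 := by push_cast; ring
      rw [hm, PySem.List.pyRange_one_succ_right (by omega), List.foldl_append]
      simp only [List.foldl_cons, List.foldl_nil]
      rw [pv_length_setCell, ih]

theorem pv_getD_writeB (col : Int) (vals : List Int) :
    ∀ (m : Nat) (bd : List (List Int)) (i : Nat),
      ((PySem.List.pyRange 0 (m : Int) 1).foldl
        (fun b2 r => pvSetCell b2 r col (PySem.List.pyGetD vals r 0)) bd).getD i [] =
        if i < m ∧ i < bd.length then PySem.List.pySetD (bd.getD i []) col (vals.getD i 0)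
        else bd.getD i [] := by
  intro m
  induction m with
  | zero =>
      intro bd i
      rw [PySem.List.pyRange_one_eq_nil (by omega), List.foldl_nil, if_neg (by omega)]
  | succ m ih =>
      intro bd i
      have hm : ((m + 1 : Nat) : Int) = (m : Int) + 1 := by push_cast; ring
      rw [hm, PySem.List.pyRange_one_succ_right (by omega), List.foldl_append]
      simp only [List.foldl_cons, List.foldl_nil]
      have h := pv_getD_setCell
        ((PySem.List.pyRange 0 (m : Int) 1).foldl
          (fun b2 r => pvSetCell b2 r col (PySem.List.pyGetD vals r 0)) bd)
        (m : Int) col (PySem.List.pyGetD vals (m : Int) 0) i (by omega)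
      rw [pv_length_writeB] at h
      rw [h]
      by_cases him : i = m
      · subst him
        by_cases hlen : i < bd.length
        · rw [if_pos ⟨rfl, hlen⟩, ih, if_neg (by omega), if_pos ⟨by omega, hlen⟩,
              PySem.List.pyGetD_natCast]
        · rw [if_neg (by simp; omega), ih, if_neg (by omega), if_neg (by omega)]
      · rw [if_neg (fun hc => him (by exact_mod_cast hc.1)), ih]
        by_cases hi : i < m ∧ i < bd.length
        · rw [if_pos hi, if_pos ⟨by omega, hi.2⟩]
        · rw [if_neg hi, if_neg (by omega)]

-- getD-extensionality
theorem pv_ext_getD (l1 l2 : List (List Int)) (hlen : l1.length = l2.length)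
    (h : ∀ i, i < l1.length → l1.getD i [] = l2.getD i []) : l1 = l2 := by
  apply List.ext_getElem hlen
  intro i h1 h2
  have := h i h1
  rwa [List.getD_eq_getElem _ _ h1, List.getD_eq_getElem _ _ h2] at this

-- the per-column bodies of the two ports agree (n = bd.length supplied by the outer invariant)
theorem pv_col_step_eq (tracker : List (List Int)) (col : Int) (hcol : 0 ≤ col)
    (bd : List (List Int)) :
    (let step := (PySem.List.pyRange ((bd.length : Int) - 1) (-1) (-1)).foldl
        (fun (st : List (List Int) × Int) row =>
          if PySem.List.pyGetD (PySem.List.pyGetD tracker row []) col 0 == 0 then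
            (pvSetCell st.1 st.2 col (pvVal st.1 row col), st.2 - 1)
          else st)
        (bd, (bd.length : Int) - 1)
     (PySem.List.pyRange step.2 (-1) (-1)).foldl
        (fun b2 row_ => pvSetCell b2 row_ col 0) step.1) =
    (let kept := (PySem.List.pyRange 0 (bd.length : Int) 1).filterMap
        (fun r => if PySem.List.pyGetD (PySem.List.pyGetD tracker r []) col 0 == 0
                  then some (pvVal bd r col) else none)
     let newcol := List.replicate (bd.length - kept.length) 0 ++ kept
     (PySem.List.pyRange 0 (bd.length : Int) 1).foldl
        (fun b2 r => pvSetCell b2 r col (PySem.List.pyGetD newcol r 0)) bd) := by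
  rcases bd with _ | ⟨row0, rows⟩
  · -- empty board: every range involved is empty
    simp [PySem.List.pyRange_neg_one_eq_nil, PySem.List.pyRange_one_eq_nil]
  · generalize hbd : (row0 :: rows : List (List Int)) = bd
    have hn : 1 ≤ bd.length := by rw [← hbd]; simp
    clear hbd row0 rows
    have hrw := pv_phase1 tracker col bd.length bd ((bd.length : Int) - 1) (by omega)
    have hfk := pv_filter_kept tracker col bd bd.length
    dsimp only
    rw [hrw, hfk]
    dsimp only
    set K := pvKeptRev tracker col bd bd.length with hK
    have hk : K.length ≤ bd.length := pv_keptRev_length_le tracker col bd bd.length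
    have harith : (bd.length : Int) - 1 - (K.length : Int) = ((bd.length - K.length : Nat) : Int) - 1 := by
      rw [Nat.cast_sub hk]; ring
    rw [harith, pv_phase2 col (bd.length - K.length) _]
    rw [List.length_reverse]
    apply pv_ext_getD
    · rw [pv_length_zeroFill, pv_length_writeUp, pv_length_writeB]
    · intro i hi
      rw [pv_length_zeroFill, pv_length_writeUp] at hi
      rw [pv_getD_zeroFill, pv_length_writeUp,
          pv_getD_writeUp col K bd ((bd.length : Int) - 1) i (by omega) (by omega),
          pv_getD_writeB]
      rw [if_pos (show i < bd.length ∧ i < bd.length from ⟨hi, hi⟩)]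
      by_cases hzone : i < bd.length - K.length
      · rw [if_pos (show i < bd.length - K.length ∧ i < bd.length from ⟨hzone, hi⟩),
            if_neg (show ¬ ((bd.length : Int) - 1 - (K.length : Int) < (i : Int) ∧
              (i : Int) ≤ (bd.length : Int) - 1) from by omega)]
        congr 1
        rw [List.getD_append _ _ _ i (by rw [List.length_replicate]; omega),
            List.getD_replicate _ (by omega)]
      · rw [if_neg (show ¬ (i < bd.length - K.length ∧ i < bd.length) from by omega),
            if_pos (show (bd.length : Int) - 1 - (K.length : Int) < (i : Int) ∧
              (i : Int) ≤ (bd.length : Int) - 1 from by omega)]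
        congr 1
        rw [List.getD_append_right _ _ _ i (by rw [List.length_replicate]; omega),
            List.length_replicate,
            List.getD_reverse _ (by omega)]
        congr 1
        omega

-- the outer folds agree step by step while the board keeps its length
theorem pv_foldl_inv_congr {α β : Type} (P : β → Prop) (f g : β → α → β) :
    ∀ (l : List α) (b : β),
      (∀ b a, a ∈ l → P b → f b a = g b a) →
      (∀ b a, a ∈ l → P b → P (g b a)) →
      P b → l.foldl f b = l.foldl g b := by
  intro l
  induction l with
  | nil => intro b _ _ _; rfl
  | cons a l ih =>
      intro b hfg hP hb
      rw [List.foldl_cons, List.foldl_cons, hfg b a List.mem_cons_self hb]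
      exact ih _ (fun b' a' ha' => hfg b' a' (List.mem_cons_of_mem _ ha'))
              (fun b' a' ha' => hP b' a' (List.mem_cons_of_mem _ ha')) (hP b a List.mem_cons_self hb)

-- ===== VERDICT (by name: the statement is the Claim_ definition above) =====
theorem crush_only_spec : Claim_equal_crush_only := by
  intro board tracker _ _
  unfold Spec_crush_only crush_only crush_only_alt
  apply pv_foldl_inv_congr (fun b => b.length = board.length)
  · intro bd col hcol hlen
    have h0 : 0 ≤ col := (PySem.List.mem_pyRange_one.1 hcol).1
    rw [← hlen]
    exact pv_col_step_eq tracker col h0 bd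
  · intro bd col _ hlen
    have h := pv_length_writeB col
      (List.replicate (board.length - ((PySem.List.pyRange 0 (board.length : Int) 1).filterMap
          (fun r => if PySem.List.pyGetD (PySem.List.pyGetD tracker r []) col 0 == 0
                    then some (pvVal bd r col) else none)).length) 0 ++
        ((PySem.List.pyRange 0 (board.length : Int) 1).filterMap
          (fun r => if PySem.List.pyGetD (PySem.List.pyGetD tracker r []) col 0 == 0
                    then some (pvVal bd r col) else none)))
      board.length bd
    exact h.trans hlen
  · rfl
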